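-- pv_equiv track=rewrite | github.com/Expelliarmus-R/100DaysOfDsa-ML | DSA/Day 20/sum of beuty of all strings.py | sumofbeauty
-- ===== SOURCE A (Python) =====
-- def sumofbeauty(s):
--     n=len(s)
--     total=0
--     for i in range(n):
--         freq={}
--         for j in range(i,n):
--             freq[s[j]]=freq.get(s[j],0)+1
--
--         values=freq.values()
--         mini=min(values)
--         maxi=max(values)
--         total+=(maxi-mini)
--     return total
-- ===== SOURCE B (Python) =====
-- def sumofbeauty(s):
--     counts = {}
--     total = 0
--     for ch in reversed(s):
--         counts[ch] = counts.get(ch, 0) + 1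
--         vals = counts.values()
--         total += max(vals) - min(vals)
--     return total
-- ===== Notes on version B (the rewrite author's own statement) =====
-- stated objective: faster
-- what changed: Replaced the per-suffix dict rebuild (nested loops) by a single right-to-left pass that maintains one incremental frequency counter and adds max-min after each character.
import Mathlib
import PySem

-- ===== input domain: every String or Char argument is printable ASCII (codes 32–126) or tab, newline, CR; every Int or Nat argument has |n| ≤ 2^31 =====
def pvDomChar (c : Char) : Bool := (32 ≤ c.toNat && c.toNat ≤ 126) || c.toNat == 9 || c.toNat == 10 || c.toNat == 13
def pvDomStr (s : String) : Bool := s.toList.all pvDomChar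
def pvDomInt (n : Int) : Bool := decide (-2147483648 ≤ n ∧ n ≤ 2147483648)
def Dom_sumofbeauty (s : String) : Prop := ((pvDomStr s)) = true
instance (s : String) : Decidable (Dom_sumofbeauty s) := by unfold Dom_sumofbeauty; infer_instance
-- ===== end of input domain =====

-- B replaces A's per-suffix dict rebuild (nested loops) by one right-to-left pass
-- carrying an incremental frequency counter (objective: faster).

-- ===== PORT A =====
-- literal port of A: for each i in range(n), build freq over s[i:n], add max(values)-min(values).
-- (the `none` arms are unreachable: j stays in range and freq is nonempty when min/max are read,
--  so Python A raises nowhere and no Pre_ is needed)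
def sumofbeauty (s : String) : Int :=
  let n : Int := (s.toList.length : Int)
  (PySem.List.pyRange 0 n).foldl (fun total i =>
    let freq : PySem.Dict Char Int :=
      (PySem.List.pyRange i n).foldl (fun freq j =>
        match PySem.List.pyGet? s.toList j with
        | some c => freq.insert c (freq.getD c 0 + 1)
        | none => freq) PySem.Dict.empty
    match PySem.List.min? freq.values (fun v => v), PySem.List.max? freq.values (fun v => v) with
    | some mini, some maxi => total + (maxi - mini)
    | _, _ => total) 0

-- ===== PORT B =====
-- literal port of Source B: one pass over reversed(s), carrying the pair (counts, total)
def sumofbeauty_alt (s : String) : Int :=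
  (s.toList.reverse.foldl (fun (st : PySem.Dict Char Int × Int) ch =>
    let counts := st.1.insert ch (st.1.getD ch 0 + 1)
    match PySem.List.min? counts.values (fun v => v) with
    | some mini =>
      match PySem.List.max? counts.values (fun v => v) with
      | some maxi => (counts, st.2 + (maxi - mini))
      | none => (counts, st.2)
    | none => (counts, st.2)) (PySem.Dict.empty, 0)).2

-- ===== PRECONDITION & SPEC =====
def Spec_sumofbeauty (s : String) (out : Int) : Prop := out = sumofbeauty_alt s
instance (s : String) (out : Int) : Decidable (Spec_sumofbeauty s out) := by unfold Spec_sumofbeauty; infer_instance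

-- ===== CLAIM (what is proved, stated in full; the proofs are below) =====
def Claim_equal_sumofbeauty : Prop := ∀ (s : String), Dom_sumofbeauty s → Spec_sumofbeauty s (sumofbeauty s)

-- ===== LEMMAS AND PROOFS =====

-- beauty of a frequency dict: max(values) - min(values), 0 if empty
def beautyD (d : PySem.Dict Char Int) : Int :=
  match PySem.List.min? d.values (fun v => v), PySem.List.max? d.values (fun v => v) with
  | some mini, some maxi => maxi - mini
  | _, _ => 0

-- beauty of a list of characters (the common spec of both per-step terms)
def beauty (u : List Char) : Int := beautyD (PySem.Dict.counter u)

-- min over an Int list depends only on the multiset of elements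
theorem min?_perm_int {xs ys : List Int} (h : xs.Perm ys) :
    PySem.List.min? xs (fun v => v) = PySem.List.min? ys (fun v => v) := by
  rcases hx : PySem.List.min? xs (fun v => v) with _ | m
  · rw [PySem.List.min?_eq_none_iff] at hx; subst hx
    have : ys = [] := h.symm.eq_nil
    simp [this, PySem.List.min?]
  · rcases hy : PySem.List.min? ys (fun v => v) with _ | m'
    · rw [PySem.List.min?_eq_none_iff] at hy; subst hy
      simp [h.eq_nil] at hx
      simp [PySem.List.min?] at hx
    · have h1 := PySem.List.min?_isMin hx m' (h.mem_iff.mpr (PySem.List.min?_mem hy))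
      have h2 := PySem.List.min?_isMin hy m (h.symm.mem_iff.mpr (PySem.List.min?_mem hx))
      simp only [Option.some.injEq]
      omega

theorem max?_perm_int {xs ys : List Int} (h : xs.Perm ys) :
    PySem.List.max? xs (fun v => v) = PySem.List.max? ys (fun v => v) := by
  rcases hx : PySem.List.max? xs (fun v => v) with _ | m
  · rw [PySem.List.max?_eq_none_iff] at hx; subst hx
    have : ys = [] := h.symm.eq_nil
    simp [this, PySem.List.max?]
  · rcases hy : PySem.List.max? ys (fun v => v) with _ | m'
    · rw [PySem.List.max?_eq_none_iff] at hy; subst hy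
      simp [h.eq_nil] at hx
      simp [PySem.List.max?] at hx
    · have h1 := PySem.List.max?_isMax hx m' (h.mem_iff.mpr (PySem.List.max?_mem hy))
      have h2 := PySem.List.max?_isMax hy m (h.symm.mem_iff.mpr (PySem.List.max?_mem hx))
      simp only [Option.some.injEq]
      omega

-- two lists with the same character counts have permuted counter values
theorem values_counter_perm {u v : List Char} (h : ∀ c, u.count c = v.count c) :
    (PySem.Dict.counter u).values.Perm (PySem.Dict.counter v).values := by
  have hp : (PySem.Set.ofList u).Perm (PySem.Set.ofList v) := by
    rw [List.perm_ext_iff_of_nodup (PySem.Set.nodup_ofList u) (PySem.Set.nodup_ofList v)]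
    intro a
    rw [PySem.Set.mem_ofList, PySem.Set.mem_ofList, ← List.count_pos_iff, ← List.count_pos_iff, h a]
  have hv : (PySem.Dict.counter u).values = (PySem.Set.ofList u).map (fun k => ((u.count k : Nat) : Int)) := by
    simp [PySem.Dict.values, PySem.Dict.items_counter, List.map_map, Function.comp]
  have hv' : (PySem.Dict.counter v).values = (PySem.Set.ofList v).map (fun k => ((v.count k : Nat) : Int)) := by
    simp [PySem.Dict.values, PySem.Dict.items_counter, List.map_map, Function.comp]
  rw [hv, hv']
  have : (PySem.Set.ofList u).map (fun k => ((u.count k : Nat) : Int))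
       = (PySem.Set.ofList u).map (fun k => ((v.count k : Nat) : Int)) := by
    simp only [h]
  rw [this]
  exact hp.map _

theorem beauty_reverse (u : List Char) : beauty u.reverse = beauty u := by
  unfold beauty beautyD
  rw [min?_perm_int (values_counter_perm (u := u.reverse) (v := u) (fun c => by simp)),
      max?_perm_int (values_counter_perm (u := u.reverse) (v := u) (fun c => by simp))]

-- A's inner loop over pyRange i n with indexing = fold over the suffix cs.drop i
theorem innerA (cs : List Char) (i : Nat) (h : i ≤ cs.length)
    (d : PySem.Dict Char Int) :
    (PySem.List.pyRange (i : Int) (cs.length : Int)).foldl (fun freq j =>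
        match PySem.List.pyGet? cs j with
        | some c => freq.insert c (freq.getD c 0 + 1)
        | none => freq) d
      = (cs.drop i).foldl (fun freq c => freq.insert c (freq.getD c 0 + 1)) d := by
  have main : ∀ (k i : Nat) (d : PySem.Dict Char Int), i ≤ cs.length → cs.length - i = k →
      (PySem.List.pyRange (i : Int) (cs.length : Int)).foldl (fun freq j =>
        match PySem.List.pyGet? cs j with
        | some c => freq.insert c (freq.getD c 0 + 1)
        | none => freq) d
      = (cs.drop i).foldl (fun freq c => freq.insert c (freq.getD c 0 + 1)) d := by
    intro k
    induction k with
    | zero =>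
      intro i d h1 h2
      have hi : i = cs.length := by omega
      subst hi
      rw [List.drop_length]
      have he : PySem.List.pyRange ((cs.length : Nat) : Int) ((cs.length : Nat) : Int) = [] := by
        simp [PySem.List.pyRange]
      rw [he]
      rfl
    | succ k ih =>
      intro i d h1 h2
      have hi : i < cs.length := by omega
      rw [PySem.List.pyRange_one_cons (by exact_mod_cast hi)]
      rw [List.drop_eq_getElem_cons hi]
      simp only [List.foldl_cons, PySem.List.pyGet?_natCast, List.getElem?_eq_getElem hi]
      have hcast : ((i : Int) + 1) = ((i + 1 : Nat) : Int) := by push_cast; ring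
      rw [hcast]
      exact ih (i + 1) _ (by omega) (by omega)
  exact main (cs.length - i) i d h (rfl)

theorem sum_list_range (n : Nat) (f : Nat → Int) :
    ((List.range n).map f).sum = ∑ i ∈ Finset.range n, f i := by
  induction n with
  | zero => simp
  | succ n ih => rw [List.range_succ, Finset.sum_range_succ]; simp [ih]

-- A's per-i match equals accumulating beautyD
theorem beautyD_match (d : PySem.Dict Char Int) (total : Int) :
    (match PySem.List.min? d.values (fun v => v), PySem.List.max? d.values (fun v => v) with
     | some mini, some maxi => total + (maxi - mini)
     | _, _ => total) = total + beautyD d := by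
  rcases h1 : PySem.List.min? d.values (fun v => v) with _ | m <;>
    rcases h2 : PySem.List.max? d.values (fun v => v) with _ | M <;>
    simp [beautyD, h1, h2]

theorem Aside (s : String) :
    sumofbeauty s = ∑ k ∈ Finset.range s.toList.length, beauty (s.toList.drop k) := by
  simp only [sumofbeauty]
  rw [PySem.List.pyRange_zero_natCast, List.foldl_map]
  rw [PySem.List.foldl_congr_mem _ _ (fun (total : Int) (k : Nat) => total + beauty (s.toList.drop k)) 0 ?_]
  · rw [PySem.List.foldl_add]
    simp [sum_list_range]
  · intro total k hk
    rw [List.mem_range] at hk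
    rw [innerA s.toList k (by omega) PySem.Dict.empty,
        PySem.Dict.foldl_insert_getD_add_one_eq_counter]
    exact beautyD_match _ _

-- the sum of beauties of the growing prefixes m++l.take k (k = 1..|l|)
def PS : List Char → List Char → Int
  | _, [] => 0
  | m, c :: t => beauty (m ++ [c]) + PS (m ++ [c]) t

theorem counter_snoc (m : List Char) (c : Char) :
    (PySem.Dict.counter m).insert c ((PySem.Dict.counter m).getD c 0 + 1)
      = PySem.Dict.counter (m ++ [c]) := by
  rw [← PySem.Dict.foldl_insert_getD_add_one_eq_counter m,
      ← PySem.Dict.foldl_insert_getD_add_one_eq_counter (m ++ [c]), List.foldl_append]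
  rfl

theorem Bfold' (l m : List Char) (acc : Int) :
    (l.foldl (fun (st : PySem.Dict Char Int × Int) ch =>
      (st.1.insert ch (st.1.getD ch 0 + 1),
       st.2 + beautyD (st.1.insert ch (st.1.getD ch 0 + 1)))) (PySem.Dict.counter m, acc)).2
      = acc + PS m l := by
  induction l generalizing m acc with
  | nil => simp [PS]
  | cons c t ih =>
    rw [List.foldl_cons]
    simp only [counter_snoc m c]
    rw [ih (m ++ [c]) _]
    show acc + beauty (m ++ [c]) + PS (m ++ [c]) t = acc + PS m (c :: t)
    simp [PS]; ring

theorem Bfold (l m : List Char) (acc : Int) :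
    (l.foldl (fun (st : PySem.Dict Char Int × Int) ch =>
      let counts := st.1.insert ch (st.1.getD ch 0 + 1)
      match PySem.List.min? counts.values (fun v => v) with
      | some mini =>
        match PySem.List.max? counts.values (fun v => v) with
        | some maxi => (counts, st.2 + (maxi - mini))
        | none => (counts, st.2)
      | none => (counts, st.2)) (PySem.Dict.counter m, acc)).2 = acc + PS m l := by
  have hstep : (fun (st : PySem.Dict Char Int × Int) ch =>
      let counts := st.1.insert ch (st.1.getD ch 0 + 1)
      match PySem.List.min? counts.values (fun v => v) with
      | some mini =>
        match PySem.List.max? counts.values (fun v => v) with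
        | some maxi => (counts, st.2 + (maxi - mini))
        | none => (counts, st.2)
      | none => (counts, st.2))
      = (fun (st : PySem.Dict Char Int × Int) ch =>
        (st.1.insert ch (st.1.getD ch 0 + 1),
         st.2 + beautyD (st.1.insert ch (st.1.getD ch 0 + 1)))) := by
    funext st ch
    rcases h1 : PySem.List.min? ((st.1.insert ch (st.1.getD ch 0 + 1)).values) (fun v => v) with _ | m <;>
      rcases h2 : PySem.List.max? ((st.1.insert ch (st.1.getD ch 0 + 1)).values) (fun v => v) with _ | M <;>
      simp [beautyD, h1, h2]
  rw [hstep]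
  exact Bfold' l m acc

theorem PS_sum (l m : List Char) :
    PS m l = ∑ k ∈ Finset.range l.length, beauty (m ++ l.take (k + 1)) := by
  induction l generalizing m with
  | nil => simp [PS]
  | cons c t ih =>
    rw [PS, ih (m ++ [c])]
    simp only [List.length_cons]
    rw [Finset.sum_range_succ' (fun k => beauty (m ++ (c :: t).take (k + 1))) t.length]
    simp [List.append_assoc]
    ring

theorem Bside (s : String) :
    sumofbeauty_alt s = ∑ k ∈ Finset.range s.toList.length, beauty (s.toList.drop k) := by
  simp only [sumofbeauty_alt]
  rw [show (PySem.Dict.empty : PySem.Dict Char Int) = PySem.Dict.counter [] from rfl]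
  rw [Bfold, PS_sum]
  rw [zero_add]
  have hlen : s.toList.reverse.length = s.toList.length := by simp
  rw [hlen]
  rw [← Finset.sum_range_reflect (fun k => beauty (s.toList.drop k)) s.toList.length]
  apply Finset.sum_congr rfl
  intro k hk
  rw [Finset.mem_range] at hk
  have h1 : [] ++ s.toList.reverse.take (k + 1) = s.toList.reverse.take (k + 1) := by simp
  rw [h1, List.take_reverse, beauty_reverse,
      show s.toList.length - (k + 1) = s.toList.length - 1 - k from by omega]

-- ===== VERDICT (by name: the statement is the Claim_ definition above) =====
theorem sumofbeauty_spec : Claim_equal_sumofbeauty := by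
  intro s _
  unfold Spec_sumofbeauty
  rw [Aside, Bside]
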